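-- pv_equiv track=rewrite | github.com/libinglun/Machine-Learning-Predict-Sentiment-in-Reviews | exercises/tick6.py | get_agreement_table
-- ===== SOURCE A (Python) =====
-- from typing import List, Dict, Union
--
-- def get_agreement_table(review_predictions: List[Dict[int, int]]) -> Dict[int, Dict[int,int]]:
--     """
--     Builds an agreement table from the student predictions.
--
--     @param review_predictions: a list of predictions for each student, the predictions are encoded as dictionaries,\
--      with the key being the review id and the value the predicted sentiment
--     @return: an agreement table, which for each review contains the number of predictions that predicted each sentiment.
--     """
--     agreement_table = {}
--     for prediction in review_predictions:
--         for key in prediction.keys():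
--             if key not in agreement_table.keys():
--                 agreement_table[key] = {1: 0, -1: 0}
--             agreement_table[key][prediction[key]] += 1
--
--     return agreement_table
-- ===== SOURCE B (Python) =====
-- def get_agreement_table(review_predictions):
--     # Pass 1: group predicted sentiments by review id, in first-occurrence order.
--     groups = {}
--     for prediction in review_predictions:
--         for review_id, sentiment in prediction.items():
--             groups.setdefault(review_id, []).append(sentiment)
--     # Pass 2: count sentiments per review id into a pre-initialized {1: 0, -1: 0} dict
--     # (so an invalid sentiment still raises KeyError and both keys are always present).
--     table = {}
--     for review_id, sentiments in groups.items():
--         counts = {1: 0, -1: 0}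
--         for s in sentiments:
--             counts[s] += 1
--         table[review_id] = counts
--     return table
-- ===== Notes on version B (the rewrite author's own statement) =====
-- stated objective: alternative
-- what changed: Single interleaved init-and-increment loop over a dict-of-dicts replaced by a two-pass decomposition: first group sentiments per review id, then count each group into a fresh {1:0,-1:0} dict.
import Mathlib
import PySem

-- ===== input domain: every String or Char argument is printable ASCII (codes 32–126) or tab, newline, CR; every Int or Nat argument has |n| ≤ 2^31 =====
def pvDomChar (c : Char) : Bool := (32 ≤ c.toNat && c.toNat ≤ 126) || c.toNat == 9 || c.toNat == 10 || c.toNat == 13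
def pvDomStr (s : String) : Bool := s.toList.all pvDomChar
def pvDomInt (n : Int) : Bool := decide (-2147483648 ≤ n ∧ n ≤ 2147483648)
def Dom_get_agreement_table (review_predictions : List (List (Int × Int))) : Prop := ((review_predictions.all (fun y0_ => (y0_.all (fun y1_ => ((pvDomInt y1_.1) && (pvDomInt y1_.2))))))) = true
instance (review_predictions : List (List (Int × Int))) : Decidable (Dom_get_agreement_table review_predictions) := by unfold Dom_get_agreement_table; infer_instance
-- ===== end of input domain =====

-- B replaces A's interleaved init-and-increment loop over a dict-of-dicts by a two-pass
-- decomposition (group sentiments by review id, then count each group); same cost, proved equal.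

-- ===== PORT A =====
-- Literal port of A; `prediction[key]` is ported as `getD key 0`, exact because key ∈ keys;
-- `agreement_table[key][v] += 1` is `modify v 0 (· + 1)`, exact on Pre_ (Python raises KeyError
-- when v ∉ {1, -1}; those inputs are excluded by Pre_).
def get_agreement_table (review_predictions : List (List (Int × Int))) : List (Int × List (Int × Int)) :=
  let agreement_table : PySem.Dict Int (PySem.Dict Int Int) :=
    review_predictions.foldl (fun agreement_table prediction =>
      let p := PySem.Dict.ofList prediction
      p.keys.foldl (fun agreement_table key =>
        let agreement_table :=
          if agreement_table.contains key = false then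
            agreement_table.insert key (PySem.Dict.ofList [(1, 0), (-1, 0)])
          else agreement_table
        agreement_table.insert key
          ((agreement_table.getD key PySem.Dict.empty).modify (p.getD key 0) 0 (· + 1)))
        agreement_table) PySem.Dict.empty
  agreement_table.items.map (fun q => (q.1, q.2.items))

-- ===== PORT B =====
-- Literal port of Source B: `setdefault(rid, []).append(s)` is `modify rid [] (· ++ [s])`;
-- `counts[s] += 1` is `modify s 0 (· + 1)`, exact on Pre_ (same KeyError remark as in A).
def get_agreement_table_alt (review_predictions : List (List (Int × Int))) : List (Int × List (Int × Int)) :=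
  let groups : PySem.Dict Int (List Int) :=
    review_predictions.foldl (fun groups prediction =>
      (PySem.Dict.ofList prediction).items.foldl
        (fun groups q => groups.modify q.1 [] (· ++ [q.2])) groups) PySem.Dict.empty
  groups.items.map (fun q =>
    (q.1, (q.2.foldl (fun counts s => counts.modify s 0 (· + 1))
            (PySem.Dict.ofList [(1, 0), (-1, 0)])).items))

-- ===== PRECONDITION & SPEC =====
-- Pre_ excludes exactly the inputs where both Pythons raise KeyError: some predicted
-- sentiment (a value of the per-student dict) is neither 1 nor -1.
def Pre_get_agreement_table (review_predictions : List (List (Int × Int))) : Prop :=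
  ∀ p ∈ review_predictions, ∀ q ∈ (PySem.Dict.ofList p).items, q.2 = 1 ∨ q.2 = -1
instance (review_predictions : List (List (Int × Int))) : Decidable (Pre_get_agreement_table review_predictions) := by unfold Pre_get_agreement_table; infer_instance
def pvWitness_get_agreement_table : (List (List (Int × Int))) := [[(0, 1), (2, -1)], [(0, -1)]]
def Spec_get_agreement_table (review_predictions : List (List (Int × Int))) (out : List (Int × List (Int × Int))) : Prop := out = get_agreement_table_alt review_predictions
instance (review_predictions : List (List (Int × Int))) (out : List (Int × List (Int × Int))) : Decidable (Spec_get_agreement_table review_predictions out) := by unfold Spec_get_agreement_table; infer_instance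

-- ===== CLAIM (what is proved, stated in full; the proofs are below) =====
def Claim_equal_get_agreement_table : Prop := ∀ (review_predictions : List (List (Int × Int))), Dom_get_agreement_table review_predictions → Pre_get_agreement_table review_predictions → Spec_get_agreement_table review_predictions (get_agreement_table review_predictions)

-- ===== LEMMAS AND PROOFS =====

-- A's loop body, as a step over one (review id, sentiment) pair.
def stepA (d : PySem.Dict Int (PySem.Dict Int Int)) (q : Int × Int) : PySem.Dict Int (PySem.Dict Int Int) :=
  let d1 := if d.contains q.1 = false then d.insert q.1 (PySem.Dict.ofList [(1, 0), (-1, 0)]) else d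
  d1.insert q.1 ((d1.getD q.1 PySem.Dict.empty).modify q.2 0 (· + 1))

-- B's grouping step over one pair.
def stepB (g : PySem.Dict Int (List Int)) (q : Int × Int) : PySem.Dict Int (List Int) :=
  g.modify q.1 [] (· ++ [q.2])

-- B's second-pass counting of one group.
def cnt (ss : List Int) : PySem.Dict Int Int :=
  ss.foldl (fun counts s => counts.modify s 0 (· + 1)) (PySem.Dict.ofList [(1, 0), (-1, 0)])

-- The simulation map: a grouping dict, viewed as A's dict of count dicts.
def toA (g : PySem.Dict Int (List Int)) : PySem.Dict Int (PySem.Dict Int Int) :=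
  PySem.Dict.mk (g.items.map (fun q => (q.1, cnt q.2)))

theorem keys_toA (g : PySem.Dict Int (List Int)) : (toA g).keys = g.keys := by
  simp [toA, PySem.Dict.keys]

theorem items_toA (g : PySem.Dict Int (List Int)) :
    (toA g).items = g.items.map (fun q => (q.1, cnt q.2)) := rfl

theorem contains_toA (g : PySem.Dict Int (List Int)) (k : Int) :
    (toA g).contains k = g.contains k := by
  simp [PySem.Dict.contains_eq_decide_mem_keys, keys_toA]

theorem cnt_append (ss : List Int) (v : Int) :
    cnt (ss ++ [v]) = (cnt ss).modify v 0 (· + 1) := by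
  simp [cnt, List.foldl_append]

theorem stepA_toA (g : PySem.Dict Int (List Int)) (q : Int × Int) (hnd : g.keys.Nodup) :
    stepA (toA g) q = toA (stepB g q) := by
  by_cases h : g.contains q.1 = false
  · -- fresh review id: both sides append a new entry
    have hA : (toA g).contains q.1 = false := by rw [contains_toA]; exact h
    have hg : g.getD q.1 [] = [] := PySem.Dict.getD_of_not_contains g [] h
    have hstep : stepA (toA g) q = (toA g).insert q.1 (cnt [q.2]) := by
      unfold stepA
      rw [hA]
      simp only [reduceIte, PySem.Dict.insert_insert_self, PySem.Dict.getD_insert_self]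
      rfl
    have hmod : stepB g q = g.insert q.1 [q.2] := by
      simp only [stepB, PySem.Dict.modify, hg]; rfl
    rw [hstep, hmod]
    apply PySem.Dict.ext
    rw [PySem.Dict.items_insert_of_not_contains _ _ hA]
    conv_rhs => rw [items_toA, PySem.Dict.items_insert_of_not_contains _ _ h]
    rw [items_toA]
    simp
  · -- existing review id: both sides replace the entry in place
    rw [Bool.not_eq_false] at h
    have hA : (toA g).contains q.1 = true := by rw [contains_toA]; exact h
    obtain ⟨ss, hss⟩ : ∃ ss, g.get? q.1 = some ss := by
      have := (PySem.Dict.contains_eq_isSome_get? g q.1).symm.trans h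
      cases hg : g.get? q.1
      · rw [hg] at this; simp at this
      · exact ⟨_, rfl⟩
    have hmem : (q.1, ss) ∈ g.items := (PySem.Dict.get?_eq_some_iff_mem_items g q.1 ss hnd).1 hss
    have hgD : g.getD q.1 [] = ss := PySem.Dict.getD_of_get?_eq_some g [] hss
    have hAD : (toA g).getD q.1 PySem.Dict.empty = cnt ss := by
      apply PySem.Dict.getD_of_mem_items
      · exact List.mem_map.2 ⟨(q.1, ss), hmem, rfl⟩
      · rw [keys_toA]; exact hnd
    have hstep : stepA (toA g) q = (toA g).insert q.1 (cnt (ss ++ [q.2])) := by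
      unfold stepA
      rw [hA]
      simp only [Bool.true_eq_false, reduceIte]
      rw [hAD, cnt_append]
    have hmod : stepB g q = g.insert q.1 (ss ++ [q.2]) := by
      simp only [stepB, PySem.Dict.modify, hgD]
    rw [hstep, hmod]
    apply PySem.Dict.ext
    rw [PySem.Dict.items_insert_of_contains _ _ hA]
    conv_rhs => rw [items_toA, PySem.Dict.items_insert_of_contains _ _ h]
    rw [items_toA]
    simp only [List.map_map]
    apply List.map_congr_left
    intro p _
    by_cases hk : p.1 = q.1 <;> simp [Function.comp, hk]

theorem foldl_stepA_toA (L : List (Int × Int)) (g : PySem.Dict Int (List Int))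
    (hnd : g.keys.Nodup) : L.foldl stepA (toA g) = toA (L.foldl stepB g) := by
  induction L generalizing g with
  | nil => rfl
  | cons q L ih =>
    simp only [List.foldl_cons, stepA_toA g q hnd]
    exact ih (stepB g q) (by
      simp only [stepB, PySem.Dict.modify]
      exact PySem.Dict.nodup_keys_insert _ _ _ hnd)

-- A's nested loops, flattened to a single fold of stepA over all pairs.
theorem innerA (p0 : List (Int × Int)) (d : PySem.Dict Int (PySem.Dict Int Int)) :
    (PySem.Dict.ofList p0).keys.foldl
        (fun d key => stepA d (key, (PySem.Dict.ofList p0).getD key 0)) d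
      = (PySem.Dict.ofList p0).items.foldl stepA d := by
  conv_rhs => rw [PySem.Dict.items_eq_map_keys _ (PySem.Dict.nodup_keys_ofList p0) 0]
  rw [List.foldl_map]

-- A's nested loops, flattened to a single fold of stepA over all pairs.
theorem portA_flat (review_predictions : List (List (Int × Int))) :
    get_agreement_table review_predictions =
      ((review_predictions.flatMap (fun p => (PySem.Dict.ofList p).items)).foldl stepA
        PySem.Dict.empty).items.map (fun q => (q.1, q.2.items)) := by
  rw [List.foldl_flatMap]
  unfold get_agreement_table
  show ((review_predictions.foldl (fun d p =>
      (PySem.Dict.ofList p).keys.foldl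
        (fun d key => stepA d (key, (PySem.Dict.ofList p).getD key 0)) d)
      PySem.Dict.empty)).items.map (fun q => (q.1, q.2.items)) = _
  exact congrArg (fun d => d.items.map (fun q => (q.1, q.2.items)))
    (List.foldl_ext _ _ _ (fun d p _ => innerA p d))

-- B's grouping loops, flattened the same way.
theorem portB_flat (review_predictions : List (List (Int × Int))) :
    get_agreement_table_alt review_predictions =
      ((review_predictions.flatMap (fun p => (PySem.Dict.ofList p).items)).foldl stepB
        PySem.Dict.empty).items.map (fun q => (q.1, (cnt q.2).items)) := by
  rw [List.foldl_flatMap]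
  rfl

-- ===== VERDICT (by name: the statement is the Claim_ definition above) =====
theorem get_agreement_table_spec : Claim_equal_get_agreement_table := by
  intro review_predictions _ _
  unfold Spec_get_agreement_table
  rw [portA_flat, portB_flat]
  have h0 : (PySem.Dict.empty : PySem.Dict Int (PySem.Dict Int Int)) = toA PySem.Dict.empty := rfl
  rw [h0, foldl_stepA_toA _ _ PySem.Dict.nodup_keys_empty]
  simp [toA]
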